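-- pv_equiv track=rewrite | github.com/optionalg/googleinterviewhack | hack_google_interview.py | oddManOut
-- ===== SOURCE A (Python) =====
-- def oddManOut(l):
--     ht = set()
--     summ = 0
--     for item in l:
--        if item in ht:
--            summ -= item
--        else:
--            ht.add(item)
--            summ += item
--
--     return summ
-- ===== SOURCE B (Python) =====
-- def oddManOut(l):
--     counts = {}
--     for v in l:
--         counts[v] = counts.get(v, 0) + 1
--     return sum(v * (2 - c) for v, c in counts.items())
-- ===== Notes on version B (the rewrite author's own statement) =====
-- stated objective: alternative
-- what changed: Replaces A's interleaved scan (a seen-set plus a running sum updated per element) with a count-then-aggregate decomposition: one pass builds an occurrence-count dict, a second pass over the distinct values returns sum(v * (2 - c)).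
import Mathlib
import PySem

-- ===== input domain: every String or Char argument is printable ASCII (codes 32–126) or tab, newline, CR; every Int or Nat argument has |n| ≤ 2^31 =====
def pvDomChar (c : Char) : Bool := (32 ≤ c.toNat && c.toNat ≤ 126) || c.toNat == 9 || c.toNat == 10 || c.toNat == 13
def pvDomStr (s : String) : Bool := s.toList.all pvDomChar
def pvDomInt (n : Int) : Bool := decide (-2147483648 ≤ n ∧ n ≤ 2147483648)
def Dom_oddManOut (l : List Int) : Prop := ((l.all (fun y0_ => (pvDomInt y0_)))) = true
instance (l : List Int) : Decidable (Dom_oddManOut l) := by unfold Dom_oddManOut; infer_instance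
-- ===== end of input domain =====

-- B replaces A's interleaved seen-set scan by a count-then-aggregate decomposition (same O(n) cost); equal return value proved on all inputs.

-- ===== PORT A =====
def oddManOut (l : List Int) : Int :=
  (l.foldl
    (fun (st : PySem.Set Int × Int) item =>
      if PySem.Set.contains st.1 item then (st.1, st.2 - item)
      else (PySem.Set.add st.1 item, st.2 + item))
    ((PySem.Set.empty : PySem.Set Int), 0)).2

-- ===== PORT B =====
def oddManOut_alt (l : List Int) : Int :=
  let counts : PySem.Dict Int Int :=
    l.foldl (fun d v => d.insert v (d.getD v 0 + 1)) PySem.Dict.empty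
  counts.items.foldl (fun s vc => s + vc.1 * (2 - vc.2)) 0

-- ===== PRECONDITION & SPEC =====
def Spec_oddManOut (l : List Int) (out : Int) : Prop := out = oddManOut_alt l
instance (l : List Int) (out : Int) : Decidable (Spec_oddManOut l out) := by unfold Spec_oddManOut; infer_instance

-- ===== CLAIM (what is proved, stated in full; the proofs are below) =====
def Claim_equal_oddManOut : Prop := ∀ (l : List Int), Dom_oddManOut l → Spec_oddManOut l (oddManOut l)

-- ===== LEMMAS AND PROOFS =====

-- sum of the elements A's loop adds for the first time, given the already-seen set s
def pvNds : List Int → PySem.Set Int → Int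
  | [], _ => 0
  | x :: xs, s =>
    if PySem.Set.contains s x then pvNds xs s else x + pvNds xs (PySem.Set.add s x)

lemma pvFoldA (l : List Int) : ∀ (s : PySem.Set Int) (acc : Int),
    (l.foldl
      (fun (st : PySem.Set Int × Int) item =>
        if PySem.Set.contains st.1 item then (st.1, st.2 - item)
        else (PySem.Set.add st.1 item, st.2 + item)) (s, acc)).2
      = acc + 2 * pvNds l s - l.sum := by
  induction l with
  | nil => intro s acc; simp [pvNds]
  | cons x xs ih =>
    intro s acc
    by_cases h : PySem.Set.contains s x = true
    · simp only [List.foldl_cons, List.sum_cons, pvNds]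
      rw [if_pos h, if_pos h, ih]; ring
    · simp only [List.foldl_cons, List.sum_cons, pvNds]
      rw [if_neg h, if_neg h, ih]; ring

lemma pvNds_eq (l : List Int) : ∀ s : PySem.Set Int,
    pvNds l s = (PySem.Set.update s l).sum - s.sum := by
  induction l with
  | nil => intro s; simp [pvNds, PySem.Set.update]
  | cons x xs ih =>
    intro s
    have hu : PySem.Set.update s (x :: xs) = PySem.Set.update (PySem.Set.add s x) xs := rfl
    by_cases h : PySem.Set.contains s x = true
    · have hx : x ∈ s := by simpa [PySem.Set.contains] using h
      have hadd : PySem.Set.add s x = s := by simp [PySem.Set.add, hx]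
      simp only [pvNds]
      rw [if_pos h, hu, hadd, ih]
    · have hx : x ∉ s := by simpa [PySem.Set.contains] using h
      have hadd : PySem.Set.add s x = s ++ [x] := by simp [PySem.Set.add, hx]
      simp only [pvNds]
      rw [if_neg h, hu, ih (PySem.Set.add s x), hadd]
      have hs : List.sum (s ++ [x]) = List.sum s + x := by
        rw [List.sum_append, List.sum_cons, List.sum_nil, add_zero]
      rw [hs]
      ring

lemma pvCounts_eq (l : List Int) :
    l.foldl (fun d v => d.insert v (d.getD v 0 + 1)) PySem.Dict.empty
      = PySem.Dict.counter l := by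
  have hf : (fun (d : PySem.Dict Int Int) v => d.insert v (d.getD v 0 + 1))
      = (fun d v => d.modify v 0 (· + 1)) := by
    funext d v
    rfl
  rw [hf, PySem.Dict.counter_eq_foldl]

lemma pvToFinset_ofList (l : List Int) :
    (PySem.Set.ofList l).toFinset = l.toFinset := by
  ext a
  simp [List.mem_toFinset, PySem.Set.mem_ofList]

lemma pvAlt_eq (l : List Int) :
    oddManOut_alt l = 2 * (∑ a ∈ l.toFinset, a) - l.sum := by
  show (List.foldl (fun s vc => s + vc.1 * (2 - vc.2)) 0
      ((l.foldl (fun d v => d.insert v (d.getD v 0 + 1)) PySem.Dict.empty).items))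
    = 2 * (∑ a ∈ l.toFinset, a) - l.sum
  rw [pvCounts_eq, PySem.Dict.items_counter]
  rw [List.foldl_map]
  have hadd : ∀ (u : List Int),
      u.foldl (fun s k => s + k * (2 - (l.count k : Int))) 0
        = (u.map (fun k => k * (2 - (l.count k : Int)))).sum := by
    intro u
    induction u using List.reverseRecOn with
    | nil => simp
    | append_singleton ys y ih => simp [List.foldl_append, ih]
  rw [hadd]
  rw [← List.sum_toFinset _ (PySem.Set.nodup_ofList l), pvToFinset_ofList]
  have hsplit : ∑ a ∈ l.toFinset, a * (2 - (l.count a : Int))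
      = 2 * (∑ a ∈ l.toFinset, a) - ∑ a ∈ l.toFinset, a * (l.count a : Int) := by
    rw [Finset.mul_sum, ← Finset.sum_sub_distrib]
    congr 1; funext a; ring
  rw [hsplit]
  have hcount : ∑ a ∈ l.toFinset, a * (l.count a : Int) = l.sum := by
    rw [Finset.sum_list_count l]
    apply Finset.sum_congr rfl
    intro a _
    rw [nsmul_eq_mul]; ring
  rw [hcount]

lemma pvA_eq (l : List Int) :
    oddManOut l = 2 * (∑ a ∈ l.toFinset, a) - l.sum := by
  unfold oddManOut
  rw [pvFoldA]
  have h1 : pvNds l PySem.Set.empty = (PySem.Set.ofList l).sum := by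
    rw [pvNds_eq]
    have he : PySem.Set.update PySem.Set.empty l = PySem.Set.ofList l := rfl
    rw [he]
    simp [PySem.Set.empty]
  have h2 : (PySem.Set.ofList l).sum = ∑ a ∈ l.toFinset, a := by
    have := List.sum_toFinset (fun a => a) (PySem.Set.nodup_ofList l)
    rw [pvToFinset_ofList] at this
    simpa using this.symm
  rw [h1, h2]; ring

-- ===== VERDICT (by name: the statement is the Claim_ definition above) =====
theorem oddManOut_spec : Claim_equal_oddManOut := by
  intro l _
  unfold Spec_oddManOut
  rw [pvA_eq, pvAlt_eq]
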